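-- pv_equiv track=rewrite | github.com/JohannesBuchner/ultragem | scoregames.py | scoring_function
-- ===== SOURCE A (Python) =====
-- def scoring_function(events):
-- 	nspecial = [0, 0, 0]
-- 	ncombispecial_index = {22:0,42:1,44:2,51:3,52:4,54:5,55:6}
-- 	ncombispecial = [0, 0, 0, 0, 0, 0, 0]
-- 	nunlocked = 0
-- 	ndestroyed = 0
-- 	score = 0
-- 	for type, value in events:
-- 		if type == 'activated':
-- 			if value in (2,3):
-- 				nspecial[0] += 1
-- 			elif value == 4:
-- 				nspecial[1] += 1
-- 			elif value == 5:
-- 				nspecial[2] += 1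
-- 			score += 10 * value
-- 		elif type == 'unlocked':
-- 			nunlocked += value
-- 		elif type == 'destroyed':
-- 			ndestroyed += value
-- 			score += value
-- 		elif type == 'combined':
-- 			ncombispecial[ncombispecial_index[value]] += 1
-- 	return [score, ndestroyed, nunlocked] + nspecial + ncombispecial
-- ===== SOURCE B (Python) =====
-- def scoring_function(events):
-- 	activated = [v for t, v in events if t == 'activated']
-- 	destroyed = [v for t, v in events if t == 'destroyed']
-- 	unlocked = [v for t, v in events if t == 'unlocked']
-- 	combined = [v for t, v in events if t == 'combined']
-- 	nspecial = [activated.count(2) + activated.count(3),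
-- 		activated.count(4), activated.count(5)]
-- 	ncombispecial = [combined.count(k) for k in (22, 42, 44, 51, 52, 54, 55)]
-- 	score = sum(10 * v for v in activated) + sum(destroyed)
-- 	return [score, sum(destroyed), sum(unlocked)] + nspecial + ncombispecial
-- ===== Notes on version B (the rewrite author's own statement) =====
-- stated objective: alternative
-- what changed: Replaces A's single stateful loop that updates twelve counters in place with a group-then-aggregate decomposition: events are split by type into four value lists and every output component is an independent sum or count over the relevant list.
import Mathlib
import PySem

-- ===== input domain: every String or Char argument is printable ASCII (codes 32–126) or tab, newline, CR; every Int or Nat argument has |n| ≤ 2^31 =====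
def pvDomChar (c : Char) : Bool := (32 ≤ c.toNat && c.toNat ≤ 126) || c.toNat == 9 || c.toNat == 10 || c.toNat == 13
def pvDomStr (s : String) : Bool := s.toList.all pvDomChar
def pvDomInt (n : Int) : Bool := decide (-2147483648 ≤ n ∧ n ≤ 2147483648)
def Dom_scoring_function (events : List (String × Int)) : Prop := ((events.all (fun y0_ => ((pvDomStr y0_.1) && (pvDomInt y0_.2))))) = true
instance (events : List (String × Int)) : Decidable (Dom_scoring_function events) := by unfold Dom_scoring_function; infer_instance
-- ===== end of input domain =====

-- B replaces A's single stateful loop over twelve in-place counters by a group-then-aggregate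
-- decomposition (per-type value lists, then independent sums/counts); return value only, no speed claim.

-- ===== PORT A =====
-- ncombispecial_index = {22:0,42:1,44:2,51:3,52:4,54:5,55:6}
def pvCombIndex : PySem.Dict Int Int :=
  PySem.Dict.ofList [(22, 0), (42, 1), (44, 2), (51, 3), (52, 4), (54, 5), (55, 6)]

-- one iteration of A's for-loop over the mutable state (score, ndestroyed, nunlocked, nspecial, ncombispecial)
def pvStepA (s : Int × Int × Int × List Int × List Int) (ev : String × Int) :
    Int × Int × Int × List Int × List Int :=
  let (score, ndest, nunl, nspec, ncomb) := s
  let (t, v) := ev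
  if t == "activated" then
    let nspec :=
      if v == 2 || v == 3 then nspec.set 0 (nspec.getD 0 0 + 1)
      else if v == 4 then nspec.set 1 (nspec.getD 1 0 + 1)
      else if v == 5 then nspec.set 2 (nspec.getD 2 0 + 1)
      else nspec
    (score + 10 * v, ndest, nunl, nspec, ncomb)
  else if t == "unlocked" then (score, ndest, nunl + v, nspec, ncomb)
  else if t == "destroyed" then (score + v, ndest + v, nunl, nspec, ncomb)
  else if t == "combined" then
    match pvCombIndex.get? v with
    | some i => (score, ndest, nunl, nspec, ncomb.set i.toNat (ncomb.getD i.toNat 0 + 1))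
    | none => (score, ndest, nunl, nspec, ncomb)  -- Python raises KeyError here; excluded by Pre_
  else s

def scoring_function (events : List (String × Int)) : List Int :=
  let r := events.foldl pvStepA (0, 0, 0, [0, 0, 0], [0, 0, 0, 0, 0, 0, 0])
  [r.1, r.2.1, r.2.2.1] ++ r.2.2.2.1 ++ r.2.2.2.2

-- ===== PORT B =====
def scoring_function_alt (events : List (String × Int)) : List Int :=
  let activated := (events.filter (fun e => e.1 == "activated")).map (fun e => e.2)
  let destroyed := (events.filter (fun e => e.1 == "destroyed")).map (fun e => e.2)
  let unlocked := (events.filter (fun e => e.1 == "unlocked")).map (fun e => e.2)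
  let combined := (events.filter (fun e => e.1 == "combined")).map (fun e => e.2)
  let nspecial : List Int :=
    [(PySem.List.count activated 2 + PySem.List.count activated 3 : Int),
     (PySem.List.count activated 4 : Int), (PySem.List.count activated 5 : Int)]
  let ncombispecial : List Int :=
    ([22, 42, 44, 51, 52, 54, 55] : List Int).map (fun k => (PySem.List.count combined k : Int))
  let score := (activated.map (fun v => 10 * v)).sum + destroyed.sum
  [score, destroyed.sum, unlocked.sum] ++ nspecial ++ ncombispecial

-- ===== PRECONDITION & SPEC =====
-- Pre_ excludes exactly the inputs on which A raises KeyError: a 'combined' event whose value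
-- is not a key of ncombispecial_index.
def Pre_scoring_function (events : List (String × Int)) : Prop :=
  ∀ e ∈ events, e.1 = "combined" → e.2 ∈ ([22, 42, 44, 51, 52, 54, 55] : List Int)
instance (events : List (String × Int)) : Decidable (Pre_scoring_function events) := by
  unfold Pre_scoring_function; infer_instance

def pvWitness_scoring_function : (List (String × Int)) :=
  [("activated", 2), ("destroyed", 5), ("unlocked", 1), ("combined", 42), ("activated", 4)]

def Spec_scoring_function (events : List (String × Int)) (out : List Int) : Prop :=
  out = scoring_function_alt events
instance (events : List (String × Int)) (out : List Int) : Decidable (Spec_scoring_function events out) := by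
  unfold Spec_scoring_function; infer_instance

-- ===== CLAIM (what is proved, stated in full; the proofs are below) =====
def Claim_equal_scoring_function : Prop := ∀ (events : List (String × Int)), Dom_scoring_function events → Pre_scoring_function events → Spec_scoring_function events (scoring_function events)


-- ===== LEMMAS AND PROOFS =====

-- loop invariant: running A's loop from an arbitrary state adds B's per-type aggregates componentwise
lemma foldl_pvStepA (events : List (String × Int))
    (h : Pre_scoring_function events)
    (sc nd nu a b c n0 n1 n2 n3 n4 n5 n6 : Int) :
    events.foldl pvStepA (sc, nd, nu, [a, b, c], [n0, n1, n2, n3, n4, n5, n6]) =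
      (sc + (((events.filter (fun e => e.1 == "activated")).map (fun e => e.2)).map (fun v => 10 * v)).sum
          + ((events.filter (fun e => e.1 == "destroyed")).map (fun e => e.2)).sum,
       nd + ((events.filter (fun e => e.1 == "destroyed")).map (fun e => e.2)).sum,
       nu + ((events.filter (fun e => e.1 == "unlocked")).map (fun e => e.2)).sum,
       [a + PySem.List.count ((events.filter (fun e => e.1 == "activated")).map (fun e => e.2)) 2
          + PySem.List.count ((events.filter (fun e => e.1 == "activated")).map (fun e => e.2)) 3,
        b + PySem.List.count ((events.filter (fun e => e.1 == "activated")).map (fun e => e.2)) 4,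
        c + PySem.List.count ((events.filter (fun e => e.1 == "activated")).map (fun e => e.2)) 5],
       [n0 + PySem.List.count ((events.filter (fun e => e.1 == "combined")).map (fun e => e.2)) 22,
        n1 + PySem.List.count ((events.filter (fun e => e.1 == "combined")).map (fun e => e.2)) 42,
        n2 + PySem.List.count ((events.filter (fun e => e.1 == "combined")).map (fun e => e.2)) 44,
        n3 + PySem.List.count ((events.filter (fun e => e.1 == "combined")).map (fun e => e.2)) 51,
        n4 + PySem.List.count ((events.filter (fun e => e.1 == "combined")).map (fun e => e.2)) 52,
        n5 + PySem.List.count ((events.filter (fun e => e.1 == "combined")).map (fun e => e.2)) 54,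
        n6 + PySem.List.count ((events.filter (fun e => e.1 == "combined")).map (fun e => e.2)) 55]) := by
  induction events generalizing sc nd nu a b c n0 n1 n2 n3 n4 n5 n6 with
  | nil => simp
  | cons hd tl ih =>
    obtain ⟨t, v⟩ := hd
    have htl : Pre_scoring_function tl := fun e he => h e (List.mem_cons_of_mem _ he)
    by_cases ht1 : t = "activated"
    · subst ht1
      by_cases hv23 : v = 2 ∨ v = 3
      · rcases hv23 with hv | hv <;> subst hv <;>
          simp [pvStepA, ih htl, PySem.List.count, List.count_cons] <;> omega
      · push_neg at hv23
        by_cases hv4 : v = 4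
        · subst hv4
          simp [pvStepA, ih htl, PySem.List.count, List.count_cons] <;> omega
        · by_cases hv5 : v = 5
          · subst hv5
            simp [pvStepA, ih htl, PySem.List.count, List.count_cons] <;> omega
          · simp [pvStepA, hv23.1, hv23.2, hv4, hv5, ih htl, PySem.List.count, List.count_cons] <;> omega
    · by_cases ht2 : t = "unlocked"
      · subst ht2; simp [pvStepA, ih htl] <;> omega
      · by_cases ht3 : t = "destroyed"
        · subst ht3; simp [pvStepA, ih htl, add_comm, add_left_comm, add_assoc]
        · by_cases ht4 : t = "combined"
          · subst ht4
            have hv := h ("combined", v) (List.mem_cons_self) rfl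
            simp only [List.mem_cons, List.not_mem_nil, or_false] at hv
            rcases hv with hv | hv | hv | hv | hv | hv | hv
            · subst hv
              simp [pvStepA, show pvCombIndex.get? 22 = some 0 from rfl, ih htl,
                PySem.List.count, ht1, ht2, ht3] <;> omega
            · subst hv
              simp [pvStepA, show pvCombIndex.get? 42 = some 1 from rfl, ih htl,
                PySem.List.count, ht1, ht2, ht3] <;> omega
            · subst hv
              simp [pvStepA, show pvCombIndex.get? 44 = some 2 from rfl, ih htl,
                PySem.List.count, ht1, ht2, ht3] <;> omega
            · subst hv
              simp [pvStepA, show pvCombIndex.get? 51 = some 3 from rfl, ih htl,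
                PySem.List.count, ht1, ht2, ht3] <;> omega
            · subst hv
              simp [pvStepA, show pvCombIndex.get? 52 = some 4 from rfl, ih htl,
                PySem.List.count, ht1, ht2, ht3] <;> omega
            · subst hv
              simp [pvStepA, show pvCombIndex.get? 54 = some 5 from rfl, ih htl,
                PySem.List.count, ht1, ht2, ht3] <;> omega
            · subst hv
              simp [pvStepA, show pvCombIndex.get? 55 = some 6 from rfl, ih htl,
                PySem.List.count, ht1, ht2, ht3] <;> omega
          · simp [pvStepA, ht1, ht2, ht3, ht4, ih htl] <;> omega

-- ===== VERDICT (by name: the statement is the Claim_ definition above) =====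
theorem scoring_function_spec : Claim_equal_scoring_function := by
  intro events _ hpre
  show scoring_function events = scoring_function_alt events
  simp only [scoring_function, scoring_function_alt,
    foldl_pvStepA events hpre 0 0 0 0 0 0 0 0 0 0 0 0 0]
  simp
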